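-- pv_equiv track=rewrite | github.com/varun29-git/chronicle-local-agent | newsletter_agent.py | derive_browser_display_name
-- ===== SOURCE A (Python) =====
-- def derive_browser_display_name(model_reference, model_type, architecture):
--     lower_hints = " ".join(
--         part.lower()
--         for part in (model_reference, model_type, architecture)
--         if part
--     )
--
--     if "gemma-3n-e4b" in lower_hints:
--         return "Gemma 3n E4B adaptive", "E4B"
--     if "gemma-3n-e2b" in lower_hints:
--         return "Gemma 3n adaptive", "E2B"
--     if "gemma-3n" in lower_hints:
--         return "Gemma 3n adaptive", "3n"
--     if "gemma-3" in lower_hints: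
--         return "Gemma 3", "3"
--
--     fallback_name = architecture or model_type or model_reference or "Local browser model"
--     return fallback_name, ""
-- ===== SOURCE B (Python) =====
-- def _rank(hints, i):
--     # Classify the occurrence site at offset i: all four patterns share the
--     # prefix "gemma-3", so one check plus a look at what follows suffices.
--     if not hints.startswith("gemma-3", i):
--         return 0
--     if hints.startswith("n-e4b", i + 7):
--         return 4
--     if hints.startswith("n-e2b", i + 7):
--         return 3
--     if hints.startswith("n", i + 7):
--         return 2
--     return 1
--
--
-- def derive_browser_display_name(model_reference, model_type, architecture):
--     hints = " ".join(
--         part.lower()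
--         for part in (model_reference, model_type, architecture)
--         if part
--     )
--     # Single scan: classify every position's suffix, keep the maximal rank.
--     best = 0
--     for i in range(len(hints)):
--         r = _rank(hints, i)
--         if r > best:
--             best = r
--     if best == 4:
--         return "Gemma 3n E4B adaptive", "E4B"
--     if best == 3:
--         return "Gemma 3n adaptive", "E2B"
--     if best == 2:
--         return "Gemma 3n adaptive", "3n"
--     if best == 1:
--         return "Gemma 3", "3"
--     fallback = next(
--         (p for p in (architecture, model_type, model_reference) if p),
--         "Local browser model",
--     )
--     return fallback, ""
-- ===== Notes on version B (the rewrite author's own statement) =====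
-- stated objective: alternative
-- what changed: Instead of four independent substring searches in priority order, B makes a single left-to-right scan over the suffixes of the hint string, classifies each occurrence of the shared prefix 'gemma-3' by the characters that follow it into a specificity rank, keeps the maximum rank, and maps that rank to the result; the fallback is a first-truthy search instead of an 'or'-chain.
import Mathlib
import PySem

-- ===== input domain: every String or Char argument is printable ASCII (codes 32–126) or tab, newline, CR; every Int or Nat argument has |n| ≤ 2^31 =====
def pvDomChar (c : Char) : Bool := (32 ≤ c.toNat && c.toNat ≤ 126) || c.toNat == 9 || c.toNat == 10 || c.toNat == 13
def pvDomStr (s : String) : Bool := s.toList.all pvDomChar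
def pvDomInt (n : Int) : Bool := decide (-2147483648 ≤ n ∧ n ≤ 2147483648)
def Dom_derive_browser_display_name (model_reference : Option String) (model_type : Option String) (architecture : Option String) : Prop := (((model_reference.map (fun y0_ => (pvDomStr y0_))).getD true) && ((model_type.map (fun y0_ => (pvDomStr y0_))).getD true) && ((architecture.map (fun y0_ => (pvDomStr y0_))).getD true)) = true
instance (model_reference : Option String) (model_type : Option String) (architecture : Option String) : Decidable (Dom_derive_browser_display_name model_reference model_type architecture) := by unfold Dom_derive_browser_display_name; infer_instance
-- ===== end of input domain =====

-- B replaces A's four priority-ordered substring searches by ONE scan over the suffixes of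
-- the hint string: each occurrence of the shared prefix "gemma-3" is classified by the
-- characters following it into a specificity rank, the maximum rank is kept and mapped to
-- the result; the fallback is a first-truthy search instead of an 'or'-chain (objective: alternative).

-- ===== PORT A =====
-- Python's `x or y` on strings/None: first truthy, ported literally.
def pvOrStr (o : Option String) (d : String) : String :=
  match o with
  | some s => if s = "" then d else s
  | none => d

def derive_browser_display_name (model_reference : Option String) (model_type : Option String) (architecture : Option String) : String × String :=
  let lower_hints := PySem.Str.join " "
    ((([model_reference, model_type, architecture].filterMap id).filter (fun p => p ≠ "")).map PySem.Str.lower)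
  if PySem.Str.isIn "gemma-3n-e4b" lower_hints then ("Gemma 3n E4B adaptive", "E4B")
  else if PySem.Str.isIn "gemma-3n-e2b" lower_hints then ("Gemma 3n adaptive", "E2B")
  else if PySem.Str.isIn "gemma-3n" lower_hints then ("Gemma 3n adaptive", "3n")
  else if PySem.Str.isIn "gemma-3" lower_hints then ("Gemma 3", "3")
  else
    let fallback_name := pvOrStr architecture (pvOrStr model_type (pvOrStr model_reference "Local browser model"))
    (fallback_name, "")

-- ===== PORT B =====
-- Source B's _rank(hints, i): hints.startswith(p, i) is p <+: drop i, so _rank is a function of the suffix at i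
def pvRank (tail : List Char) : Nat :=
  if PySem.Chars.startswith tail "gemma-3".toList then
    let rest := tail.drop 7
    if PySem.Chars.startswith rest "n-e4b".toList then 4
    else if PySem.Chars.startswith rest "n-e2b".toList then 3
    else if PySem.Chars.startswith rest "n".toList then 2
    else 1
  else 0

-- Source B's for-loop over i in range(len(hints)): max of pvRank over the suffixes, by structural recursion
def pvBest : List Char → Nat
  | [] => 0
  | c :: rest => max (pvRank (c :: rest)) (pvBest rest)

def derive_browser_display_name_alt (model_reference : Option String) (model_type : Option String) (architecture : Option String) : String × String :=
  let hints := PySem.Str.join " "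
    ((([model_reference, model_type, architecture].filterMap id).filter (fun p => p ≠ "")).map PySem.Str.lower)
  let best := pvBest hints.toList
  if best = 4 then ("Gemma 3n E4B adaptive", "E4B")
  else if best = 3 then ("Gemma 3n adaptive", "E2B")
  else if best = 2 then ("Gemma 3n adaptive", "3n")
  else if best = 1 then ("Gemma 3", "3")
  else
    let fallback := (([architecture, model_type, model_reference].filterMap id).find? (fun p => p ≠ "")).getD "Local browser model"
    (fallback, "")

-- ===== PRECONDITION & SPEC =====
def Spec_derive_browser_display_name (model_reference : Option String) (model_type : Option String) (architecture : Option String) (out : String × String) : Prop := out = derive_browser_display_name_alt model_reference model_type architecture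
instance (model_reference : Option String) (model_type : Option String) (architecture : Option String) (out : String × String) : Decidable (Spec_derive_browser_display_name model_reference model_type architecture out) := by unfold Spec_derive_browser_display_name; infer_instance

-- ===== CLAIM (what is proved, stated in full; the proofs are below) =====
def Claim_equal_derive_browser_display_name : Prop := ∀ (model_reference : Option String) (model_type : Option String) (architecture : Option String), Dom_derive_browser_display_name model_reference model_type architecture → Spec_derive_browser_display_name model_reference model_type architecture (derive_browser_display_name model_reference model_type architecture)

-- ===== LEMMAS AND PROOFS =====

-- splitting a prefix made of two pieces
theorem prefix_append_iff_drop {a b t : List Char} :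
    (a ++ b <+: t) ↔ (a <+: t ∧ b <+: t.drop a.length) := by
  constructor
  · rintro ⟨u, rfl⟩
    refine ⟨⟨b ++ u, by simp⟩, ?_⟩
    simp
  · rintro ⟨⟨u, rfl⟩, hb⟩
    simp at hb
    obtain ⟨v, rfl⟩ := hb
    exact ⟨v, by simp⟩

theorem rank_ge_four {t : List Char} : 4 ≤ pvRank t ↔ "gemma-3n-e4b".toList <+: t := by
  have h : "gemma-3n-e4b".toList = "gemma-3".toList ++ "n-e4b".toList := by decide
  have hlen : ("gemma-3".toList).length = 7 := by decide
  rw [h, prefix_append_iff_drop, hlen]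
  simp only [pvRank, PySem.Chars.startswith_iff]
  split_ifs <;> simp_all

theorem rank_ge_three {t : List Char} :
    3 ≤ pvRank t ↔ ("gemma-3n-e4b".toList <+: t ∨ "gemma-3n-e2b".toList <+: t) := by
  have h4 : "gemma-3n-e4b".toList = "gemma-3".toList ++ "n-e4b".toList := by decide
  have h3 : "gemma-3n-e2b".toList = "gemma-3".toList ++ "n-e2b".toList := by decide
  have hlen : ("gemma-3".toList).length = 7 := by decide
  rw [h4, h3, prefix_append_iff_drop, prefix_append_iff_drop, hlen]
  simp only [pvRank, PySem.Chars.startswith_iff]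
  split_ifs <;> simp_all

theorem rank_ge_two {t : List Char} : 2 ≤ pvRank t ↔ "gemma-3n".toList <+: t := by
  have h : "gemma-3n".toList = "gemma-3".toList ++ "n".toList := by decide
  have hlen : ("gemma-3".toList).length = 7 := by decide
  have h45 : "n".toList <+: "n-e4b".toList := by decide
  have h35 : "n".toList <+: "n-e2b".toList := by decide
  rw [h, prefix_append_iff_drop, hlen]
  simp only [pvRank, PySem.Chars.startswith_iff]
  split_ifs with g a b c
  · exact ⟨fun _ => ⟨g, h45.trans a⟩, fun _ => by omega⟩
  · exact ⟨fun _ => ⟨g, h35.trans b⟩, fun _ => by omega⟩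
  · exact ⟨fun _ => ⟨g, c⟩, fun _ => by omega⟩
  · simp_all
  · simp_all

theorem rank_ge_one {t : List Char} : 1 ≤ pvRank t ↔ "gemma-3".toList <+: t := by
  simp only [pvRank, PySem.Chars.startswith_iff]
  split_ifs <;> simp_all

theorem rank_le_four (t : List Char) : pvRank t ≤ 4 := by
  simp only [pvRank]
  split_ifs <;> omega

theorem best_ge_iff {l : List Char} {r : Nat} (hr : 1 ≤ r) :
    r ≤ pvBest l ↔ ∃ j, r ≤ pvRank (l.drop j) := by
  induction l with
  | nil =>
    simp only [pvBest, List.drop_nil]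
    constructor
    · intro h; omega
    · rintro ⟨j, hj⟩
      have : pvRank ([] : List Char) = 0 := by decide
      omega
  | cons c rest ih =>
    simp only [pvBest, le_max_iff, ih]
    constructor
    · rintro (h | ⟨j, hj⟩)
      · exact ⟨0, h⟩
      · exact ⟨j + 1, by simpa using hj⟩
    · rintro ⟨j, hj⟩
      cases j with
      | zero => exact Or.inl (by simpa using hj)
      | succ j' => exact Or.inr ⟨j', by simpa using hj⟩

theorem best_le_four (l : List Char) : pvBest l ≤ 4 := by
  induction l with
  | nil => simp [pvBest]
  | cons c rest ih => simp only [pvBest, max_le_iff]; exact ⟨rank_le_four _, ih⟩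

-- the 'or'-chain and the first-truthy search over the fallback candidates agree
theorem fallback_eq (mr mt ar : Option String) :
    pvOrStr ar (pvOrStr mt (pvOrStr mr "Local browser model"))
      = (([ar, mt, mr].filterMap id).find? (fun p => p ≠ "")).getD "Local browser model" := by
  cases mr <;> cases mt <;> cases ar <;>
    simp [pvOrStr, List.filterMap, List.find?] <;> split_ifs <;> simp_all

-- the priority if-cascade over containment tests equals the rank-maximum dispatch
theorem branches_eq (s : String) (fb1 fb2 : String) (hfb : fb1 = fb2) :
    (if PySem.Str.isIn "gemma-3n-e4b" s then ("Gemma 3n E4B adaptive", "E4B")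
     else if PySem.Str.isIn "gemma-3n-e2b" s then ("Gemma 3n adaptive", "E2B")
     else if PySem.Str.isIn "gemma-3n" s then ("Gemma 3n adaptive", "3n")
     else if PySem.Str.isIn "gemma-3" s then ("Gemma 3", "3")
     else (fb1, "")) =
    (let best := pvBest s.toList
     if best = 4 then ("Gemma 3n E4B adaptive", "E4B")
     else if best = 3 then ("Gemma 3n adaptive", "E2B")
     else if best = 2 then ("Gemma 3n adaptive", "3n")
     else if best = 1 then ("Gemma 3", "3")
     else (fb2, "")) := by
  subst hfb
  have hble := best_le_four s.toList
  have hb4 : PySem.Str.isIn "gemma-3n-e4b" s = true ↔ 4 ≤ pvBest s.toList := by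
    rw [best_ge_iff (by omega)]
    rw [PySem.Str.isIn_eq, ← PySem.Chars.exists_prefix_drop_iff_isIn]
    exact exists_congr (fun j => rank_ge_four.symm)
  have hb3 : 3 ≤ pvBest s.toList ↔
      (PySem.Str.isIn "gemma-3n-e4b" s = true ∨ PySem.Str.isIn "gemma-3n-e2b" s = true) := by
    rw [best_ge_iff (by omega)]
    rw [PySem.Str.isIn_eq, PySem.Str.isIn_eq,
        ← PySem.Chars.exists_prefix_drop_iff_isIn, ← PySem.Chars.exists_prefix_drop_iff_isIn]
    rw [← exists_or]
    exact exists_congr (fun j => rank_ge_three)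
  have hb2 : PySem.Str.isIn "gemma-3n" s = true ↔ 2 ≤ pvBest s.toList := by
    rw [best_ge_iff (by omega)]
    rw [PySem.Str.isIn_eq, ← PySem.Chars.exists_prefix_drop_iff_isIn]
    exact exists_congr (fun j => rank_ge_two.symm)
  have hb1 : PySem.Str.isIn "gemma-3" s = true ↔ 1 ≤ pvBest s.toList := by
    rw [best_ge_iff (by omega)]
    rw [PySem.Str.isIn_eq, ← PySem.Chars.exists_prefix_drop_iff_isIn]
    exact exists_congr (fun j => rank_ge_one.symm)
  simp only [PySem.Str.isIn_eq] at hb4 hb3 hb2 hb1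
  by_cases c4 : PySem.Chars.isIn "gemma-3n-e4b".toList s.toList = true
  · have hb : pvBest s.toList = 4 := by have := hb4.mp c4; omega
    simp_all
  · have n4 : ¬ 4 ≤ pvBest s.toList := fun h => c4 (hb4.mpr h)
    by_cases c3 : PySem.Chars.isIn "gemma-3n-e2b".toList s.toList = true
    · have h3 : 3 ≤ pvBest s.toList := hb3.mpr (Or.inr c3)
      have : pvBest s.toList = 3 := by omega
      simp_all
    · have n3 : ¬ 3 ≤ pvBest s.toList := fun h => (hb3.mp h).elim c4 c3
      by_cases c2 : PySem.Chars.isIn "gemma-3n".toList s.toList = true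
      · have : pvBest s.toList = 2 := by have := hb2.mp c2; omega
        simp_all
      · have n2 : ¬ 2 ≤ pvBest s.toList := fun h => c2 (hb2.mpr h)
        by_cases c1 : PySem.Chars.isIn "gemma-3".toList s.toList = true
        · have : pvBest s.toList = 1 := by have := hb1.mp c1; omega
          simp_all
        · have n1 : ¬ 1 ≤ pvBest s.toList := fun h => c1 (hb1.mpr h)
          have : pvBest s.toList = 0 := by omega
          simp_all

-- ===== VERDICT (by name: the statement is the Claim_ definition above) =====
theorem derive_browser_display_name_spec : Claim_equal_derive_browser_display_name := by
  intro mr mt ar _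
  unfold Spec_derive_browser_display_name derive_browser_display_name derive_browser_display_name_alt
  exact branches_eq _ _ _ (fallback_eq mr mt ar)
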